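-- pv_equiv track=rewrite | github.com/dufourpascal/ephys_reaction_prediction | dataset.py | __aggregate_stim_idx
-- ===== SOURCE A (Python) =====
-- def __aggregate_stim_idx(
--
--     rows,
--     lateralization_ACC='contralateral',
--     lateralization_S1HL='contralateral',
-- ):
--     def get_key(rows, brain_area, lateralization):
--         for row in rows:
--             if row['brain_area'] == brain_area and \
--                row['lateralization'] == lateralization:
--                 idx = row['']
--                 if idx:
--                     return int(idx)
--                 else:
--                     return None
--
--     idx_acc = get_key(rows, 'ACC', lateralization_ACC)
--     idx_s1hl = get_key(rows, 'S1HL', lateralization_S1HL)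
--
--     return idx_acc, idx_s1hl
-- ===== SOURCE B (Python) =====
-- def __aggregate_stim_idx(
--     rows,
--     lateralization_ACC='contralateral',
--     lateralization_S1HL='contralateral',
-- ):
--     # One pass: first-occurrence index keyed by (brain_area, lateralization),
--     # storing the raw stim-index string; both answers are then O(1) lookups.
--     index = {}
--     for row in rows:
--         key = (row['brain_area'], row['lateralization'])
--         if key not in index:
--             index[key] = row['']
--
--     def resolve(key):
--         idx = index.get(key)
--         return int(idx) if idx else None
--
--     return resolve(('ACC', lateralization_ACC)), resolve(('S1HL', lateralization_S1HL))
-- ===== Notes on version B (the rewrite author's own statement) =====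
-- stated objective: idiomatic
-- what changed: B replaces A's two independent first-match scans with one pass that builds a first-occurrence dict keyed by (brain_area, lateralization) storing the raw stim-index string, then answers both queries by dict lookups.
import Mathlib
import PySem

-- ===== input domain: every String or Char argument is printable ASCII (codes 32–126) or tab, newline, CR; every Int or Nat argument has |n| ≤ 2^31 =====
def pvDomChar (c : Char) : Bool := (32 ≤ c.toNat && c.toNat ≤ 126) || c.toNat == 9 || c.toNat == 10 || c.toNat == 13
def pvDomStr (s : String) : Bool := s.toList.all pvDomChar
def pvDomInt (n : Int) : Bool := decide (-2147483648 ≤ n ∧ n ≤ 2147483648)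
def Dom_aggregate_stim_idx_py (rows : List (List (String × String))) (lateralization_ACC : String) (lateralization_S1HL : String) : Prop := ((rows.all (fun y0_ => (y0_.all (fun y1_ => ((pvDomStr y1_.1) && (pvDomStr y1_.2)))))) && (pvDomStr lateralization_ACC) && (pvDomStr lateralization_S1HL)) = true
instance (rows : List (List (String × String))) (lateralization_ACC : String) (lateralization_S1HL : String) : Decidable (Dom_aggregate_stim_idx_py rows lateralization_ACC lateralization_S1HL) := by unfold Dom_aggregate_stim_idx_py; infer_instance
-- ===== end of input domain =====

-- B builds a one-pass first-occurrence index dict instead of A's two first-match scans; same return value on Pre_.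

-- ===== PORT A =====
-- row['k'] / row[''] raise KeyError and int(idx) raises ValueError in Python; the getD
-- defaults below are reached only outside Pre_aggregate_stim_idx_py, which excludes those inputs.
def pvGetKeyA (rows : List (List (String × String))) (brain_area : String) (lateralization : String) : Option Int :=
  match rows with
  | [] => none
  | row :: rest =>
    if ((PySem.Dict.mk row).getD "brain_area" "") == brain_area
        && ((PySem.Dict.mk row).getD "lateralization" "") == lateralization then
      let idx := (PySem.Dict.mk row).getD "" ""
      if idx ≠ "" then some ((PySem.Int.ofStr? idx).getD 0) else none
    else pvGetKeyA rest brain_area lateralization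

def aggregate_stim_idx_py (rows : List (List (String × String))) (lateralization_ACC : String) (lateralization_S1HL : String) : Option Int × Option Int :=
  let idx_acc := pvGetKeyA rows "ACC" lateralization_ACC
  let idx_s1hl := pvGetKeyA rows "S1HL" lateralization_S1HL
  (idx_acc, idx_s1hl)

-- ===== PORT B =====
def pvRowKey (row : List (String × String)) : String × String :=
  ((PySem.Dict.mk row).getD "brain_area" "", (PySem.Dict.mk row).getD "lateralization" "")

-- the 'for row in rows: if key not in index: index[key] = row['']' loop of Source B
def pvBuildIndex (rows : List (List (String × String))) : PySem.Dict (String × String) String :=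
  rows.foldl
    (fun d row =>
      if d.contains (pvRowKey row) then d
      else d.insert (pvRowKey row) ((PySem.Dict.mk row).getD "" ""))
    PySem.Dict.empty

-- 'idx = index.get(key); return int(idx) if idx else None'
def pvResolve (d : PySem.Dict (String × String) String) (key : String × String) : Option Int :=
  match d.get? key with
  | none => none
  | some idx => if idx ≠ "" then some ((PySem.Int.ofStr? idx).getD 0) else none

def aggregate_stim_idx_py_alt (rows : List (List (String × String))) (lateralization_ACC : String) (lateralization_S1HL : String) : Option Int × Option Int :=
  let index := pvBuildIndex rows
  (pvResolve index ("ACC", lateralization_ACC), pvResolve index ("S1HL", lateralization_S1HL))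

-- ===== PRECONDITION & SPEC =====
def pvRowHasKeys (row : List (String × String)) : Bool :=
  (PySem.Dict.mk row).contains "brain_area" && (PySem.Dict.mk row).contains "lateralization"
    && (PySem.Dict.mk row).contains ""

def pvFirstOK (rows : List (List (String × String))) (brain_area : String) (lateralization : String) : Bool :=
  match rows.find? (fun row => ((PySem.Dict.mk row).getD "brain_area" "") == brain_area
        && ((PySem.Dict.mk row).getD "lateralization" "") == lateralization) with
  | none => true
  | some row =>
    let idx := (PySem.Dict.mk row).getD "" ""
    (idx == "") || (PySem.Int.ofStr? idx).isSome

-- Pre_ excludes inputs where Python raises: a row missing one of the keys 'brain_area',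
-- 'lateralization' or '' (KeyError in A or B; requiring ALL rows well-keyed slightly
-- narrows A's domain, which tolerates malformed rows after its first matches — B raises
-- there, see the cite), or a first-matching row whose stim index is non-empty but not
-- int-parsable (ValueError in both).
def Pre_aggregate_stim_idx_py (rows : List (List (String × String))) (lateralization_ACC : String) (lateralization_S1HL : String) : Prop :=
  (rows.all pvRowHasKeys && pvFirstOK rows "ACC" lateralization_ACC
    && pvFirstOK rows "S1HL" lateralization_S1HL) = true
instance (rows : List (List (String × String))) (lateralization_ACC : String) (lateralization_S1HL : String) : Decidable (Pre_aggregate_stim_idx_py rows lateralization_ACC lateralization_S1HL) := by unfold Pre_aggregate_stim_idx_py; infer_instance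

def pvWitness_aggregate_stim_idx_py : (List (List (String × String))) × String × String :=
  ([[("brain_area", "ACC"), ("lateralization", "contralateral"), ("", "3")]], "contralateral", "contralateral")

def Spec_aggregate_stim_idx_py (rows : List (List (String × String))) (lateralization_ACC : String) (lateralization_S1HL : String) (out : Option Int × Option Int) : Prop := out = aggregate_stim_idx_py_alt rows lateralization_ACC lateralization_S1HL
instance (rows : List (List (String × String))) (lateralization_ACC : String) (lateralization_S1HL : String) (out : Option Int × Option Int) : Decidable (Spec_aggregate_stim_idx_py rows lateralization_ACC lateralization_S1HL out) := by unfold Spec_aggregate_stim_idx_py; infer_instance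

-- ===== CLAIM (what is proved, stated in full; the proofs are below) =====
def Claim_equal_aggregate_stim_idx_py : Prop := ∀ (rows : List (List (String × String))) (lateralization_ACC : String) (lateralization_S1HL : String), Dom_aggregate_stim_idx_py rows lateralization_ACC lateralization_S1HL → Pre_aggregate_stim_idx_py rows lateralization_ACC lateralization_S1HL → Spec_aggregate_stim_idx_py rows lateralization_ACC lateralization_S1HL (aggregate_stim_idx_py rows lateralization_ACC lateralization_S1HL)

-- ===== LEMMAS AND PROOFS =====

-- raw stim-index string of the first row matching key (proof helper)
def pvRawFirst (rows : List (List (String × String))) (key : String × String) : Option String :=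
  match rows with
  | [] => none
  | row :: rest =>
    if pvRowKey row == key then some ((PySem.Dict.mk row).getD "" "") else pvRawFirst rest key

lemma pvBuild_get? (rows : List (List (String × String))) (d : PySem.Dict (String × String) String) (key : String × String) :
    (rows.foldl
      (fun d row =>
        if d.contains (pvRowKey row) then d
        else d.insert (pvRowKey row) ((PySem.Dict.mk row).getD "" ""))
      d).get? key = (d.get? key).or (pvRawFirst rows key) := by
  induction rows generalizing d with
  | nil => simp [pvRawFirst]
  | cons row rest ih =>
    simp only [List.foldl_cons, ih, pvRawFirst]
    by_cases hk : pvRowKey row = key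
    · subst hk
      by_cases hc : d.contains (pvRowKey row)
      · have hs : (d.get? (pvRowKey row)).isSome := by
          rw [← PySem.Dict.contains_eq_isSome_get?]; exact hc
        obtain ⟨v, hv⟩ := Option.isSome_iff_exists.mp hs
        simp [hc, hv]
      · have hs : (d.get? (pvRowKey row)).isSome = false := by
          rw [← PySem.Dict.contains_eq_isSome_get?]; simpa using hc
        have hnone : d.get? (pvRowKey row) = none := by
          cases h : d.get? (pvRowKey row) with
          | none => rfl
          | some v => rw [h] at hs; simp at hs
        simp [hc, hnone, PySem.Dict.get?_insert_self]
    · have hbeq : (pvRowKey row == key) = false := by simp [hk]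
      by_cases hc : d.contains (pvRowKey row)
      · simp [hc, hbeq]
      · simp [hc, hbeq, PySem.Dict.get?_insert_of_ne d _ (Ne.symm hk)]

lemma pvGetKeyA_eq_rawFirst (rows : List (List (String × String))) (area lat : String) :
    pvGetKeyA rows area lat =
      match pvRawFirst rows (area, lat) with
      | none => none
      | some idx => if idx ≠ "" then some ((PySem.Int.ofStr? idx).getD 0) else none := by
  induction rows with
  | nil => simp [pvGetKeyA, pvRawFirst]
  | cons row rest ih =>
    simp only [pvGetKeyA, pvRawFirst]
    have : (pvRowKey row == (area, lat)) =
        (((PySem.Dict.mk row).getD "brain_area" "") == area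
          && ((PySem.Dict.mk row).getD "lateralization" "") == lat) := by
      simp [pvRowKey, Prod.ext_iff, Bool.beq_eq_decide_eq]
    rw [this]
    by_cases h : (((PySem.Dict.mk row).getD "brain_area" "") == area
          && ((PySem.Dict.mk row).getD "lateralization" "") == lat) = true
    · simp [h]
    · simp only [Bool.not_eq_true] at h
      simp [h, ih]

lemma pvResolve_build (rows : List (List (String × String))) (area lat : String) :
    pvResolve (pvBuildIndex rows) (area, lat) = pvGetKeyA rows area lat := by
  rw [pvGetKeyA_eq_rawFirst]
  unfold pvResolve pvBuildIndex
  rw [pvBuild_get?]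
  simp [PySem.Dict.get?_empty]

-- ===== VERDICT (by name: the statement is the Claim_ definition above) =====
theorem aggregate_stim_idx_py_spec : Claim_equal_aggregate_stim_idx_py := by
  intro rows lACC lS1HL _ _
  simp only [Spec_aggregate_stim_idx_py, aggregate_stim_idx_py, aggregate_stim_idx_py_alt,
    pvResolve_build]
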